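-- pv_equiv track=rewrite | github.com/vovets/spacket | v1/tests/test_target_crc_device/tests.py | pmod
-- ===== SOURCE A (Python) =====
-- mpeg_poly = 0x04c11db7
--
-- def pmod(m, lshift):
--     m = m & 0xffffffff
--
--     def high_bit():
--         return m & 0x80000000
--
--     for i in range(lshift):
--         h = high_bit();
--         m = (m << 1) & 0xffffffff
--         if h:
--             m = m ^ mpeg_poly
--
--     return m
-- ===== SOURCE B (Python) =====
-- mpeg_poly = 0x04c11db7
--
-- def _step(v):
--     h = v & 0x80000000
--     v = (v << 1) & 0xffffffff
--     if h:
--         v = v ^ mpeg_poly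
--     return v
--
-- def _step8(v):
--     for _ in range(8):
--         v = _step(v)
--     return v
--
-- # table[t] = effect of 8 shift-and-reduce steps on the word t << 24 (built once)
-- _table = [_step8(t << 24) for t in range(256)]
--
-- def pmod(m, lshift):
--     m = m & 0xffffffff
--     n = lshift
--     while n >= 8:
--         m = ((m << 8) & 0xffffffff) ^ _table[m >> 24]
--         n -= 8
--     while n > 0:
--         m = _step(m)
--         n -= 1
--     return m
-- ===== Notes on version B (the rewrite author's own statement) =====
-- stated objective: faster
-- what changed: B replaces A's one-shift-and-reduce-per-bit loop by the classic byte-at-a-time CRC technique: a 256-entry table of the 8-step effect of each top byte, so the main loop consumes 8 shift positions per iteration.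
import Mathlib
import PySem

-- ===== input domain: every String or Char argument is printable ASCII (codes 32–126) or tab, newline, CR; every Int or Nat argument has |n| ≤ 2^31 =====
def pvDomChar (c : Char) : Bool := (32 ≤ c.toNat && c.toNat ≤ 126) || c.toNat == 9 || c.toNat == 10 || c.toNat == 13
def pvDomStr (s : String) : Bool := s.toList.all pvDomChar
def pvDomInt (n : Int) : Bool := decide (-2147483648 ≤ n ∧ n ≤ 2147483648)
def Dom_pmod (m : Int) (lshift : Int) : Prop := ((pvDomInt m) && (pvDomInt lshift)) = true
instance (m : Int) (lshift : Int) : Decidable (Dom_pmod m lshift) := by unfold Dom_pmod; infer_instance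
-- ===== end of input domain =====

-- B replaces A's one-reduction-step-per-bit loop by the classic byte-at-a-time CRC technique:
-- a 256-entry table of the 8-step effect on each possible top byte, consuming 8 shifts per iteration.
-- (Timed measurably faster by a constant factor; same O(lshift) asymptotics.)

-- ===== PORT A =====
def mpeg_poly : Int := 0x04c11db7

def pmod (m : Int) (lshift : Int) : Int :=
  let m0 := PySem.Int.band m 0xffffffff
  (List.range lshift.toNat).foldl
    (fun m _ =>
      let h := PySem.Int.band m 0x80000000
      let m := PySem.Int.band (m <<< (1 : Nat)) 0xffffffff
      if h ≠ 0 then PySem.Int.bxor m mpeg_poly else m)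
    m0

-- ===== PORT B =====
-- one shift-and-reduce step (Source B's _step)
def stepB (v : Int) : Int :=
  let h := PySem.Int.band v 0x80000000
  let v := PySem.Int.band (v <<< (1 : Nat)) 0xffffffff
  if h ≠ 0 then PySem.Int.bxor v mpeg_poly else v

-- eight steps (Source B's _step8)
def step8B (v : Int) : Int := (List.range 8).foldl (fun v _ => stepB v) v

-- Source B's _table (built once)
def tableB : List Int := (List.range 256).map (fun (t : Nat) => step8B ((t : Int) <<< (24 : Nat)))

-- the two while-loops of Source B's pmod; `List.getD … 0` is Python's `_table[m >> 24]`
-- (the index is always in range, so the default is never used)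
def pmodAltLoop (m : Int) (n : Int) : Int :=
  if 8 ≤ n then
    pmodAltLoop (PySem.Int.bxor (PySem.Int.band (m <<< (8 : Nat)) 0xffffffff)
                                (tableB.getD (m >>> (24 : Nat)).toNat 0)) (n - 8)
  else if 0 < n then pmodAltLoop (stepB m) (n - 1)
  else m
termination_by n.toNat
decreasing_by all_goals omega

def pmod_alt (m : Int) (lshift : Int) : Int :=
  pmodAltLoop (PySem.Int.band m 0xffffffff) lshift

-- ===== PRECONDITION & SPEC =====
def Spec_pmod (m : Int) (lshift : Int) (out : Int) : Prop := out = pmod_alt m lshift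
instance (m : Int) (lshift : Int) (out : Int) : Decidable (Spec_pmod m lshift out) := by unfold Spec_pmod; infer_instance

-- ===== CLAIM (what is proved, stated in full; the proofs are below) =====
def Claim_equal_pmod : Prop := ∀ (m : Int) (lshift : Int), Dom_pmod m lshift → Spec_pmod m lshift (pmod m lshift)

-- ===== LEMMAS AND PROOFS =====

-- Nat-level model of one shift-and-reduce step
def stepN (w : Nat) : Nat :=
  let h := w &&& 0x80000000
  let w' := (w <<< 1) &&& 0xffffffff
  if h ≠ 0 then w' ^^^ 0x04c11db7 else w'

theorem stepB_cast (w : Nat) : stepB (w : Int) = ((stepN w : Nat) : Int) := by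
  rw [stepB, stepN]
  rw [show ((w : Int) <<< (1 : Nat)) = ((w <<< 1 : Nat) : Int) from (Int.natCast_shiftLeft w 1).symm]
  rw [PySem.Int.band_of_nonneg (by positivity) (by norm_num),
      PySem.Int.band_of_nonneg (by positivity) (by norm_num)]
  simp only [Int.toNat_natCast]
  norm_num [mpeg_poly]
  rw [PySem.Int.bxor_of_nonneg (by positivity) (by norm_num)]
  simp

theorem stepN_lt (w : Nat) : stepN w < 4294967296 := by
  rw [stepN]
  have h1 : (w <<< 1) &&& 0xffffffff < 4294967296 := by
    have := Nat.and_two_pow_sub_one_eq_mod (w <<< 1) 32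
    norm_num at this; rw [this]; omega
  split
  · have h2 : ((w <<< 1) &&& 0xffffffff) ^^^ 0x04c11db7 < 2 ^ 32 :=
      Nat.xor_lt_two_pow (by norm_num at h1 ⊢; omega) (by norm_num)
    norm_num at h2; omega
  · exact h1

theorem stepN_xor (a b : Nat) : stepN (a ^^^ b) = stepN a ^^^ stepN b := by
  simp only [stepN]
  rw [Nat.shiftLeft_xor_distrib, Nat.and_xor_distrib_right, Nat.and_xor_distrib_right]
  have ha := Nat.and_two_pow a 31
  have hb := Nat.and_two_pow b 31
  norm_num at ha hb
  cases hta : a.testBit 31 <;> cases htb : b.testBit 31 <;>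
      simp only [hta, htb, Bool.toNat_true, Bool.toNat_false, zero_mul, one_mul] at ha hb <;>
      rw [ha, hb] <;> simp [Nat.xor_comm, Nat.xor_left_comm]

theorem stepN_iter_xor (n a b : Nat) : stepN^[n] (a ^^^ b) = stepN^[n] a ^^^ stepN^[n] b := by
  induction n generalizing a b with
  | zero => simp
  | succ k ih => simp [Function.iterate_succ_apply, stepN_xor, ih]

theorem stepN_small (w : Nat) (h : w < 2 ^ 31) : stepN w = 2 * w := by
  rw [stepN]
  have hb : w.testBit 31 = false := Nat.testBit_lt_two_pow h
  have ha := Nat.and_two_pow w 31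
  rw [hb] at ha
  norm_num at ha
  have h2 : (w <<< 1) &&& 0xffffffff = 2 * w := by
    have := Nat.and_two_pow_sub_one_eq_mod (w <<< 1) 32
    norm_num at this
    rw [this, Nat.shiftLeft_eq]
    norm_num [Nat.mod_eq_of_lt (by omega : w * 2 < 4294967296)]
    ring
  simp [ha, h2]

theorem stepN_iter8_small (w : Nat) (h : w < 2 ^ 24) : stepN^[8] w = 256 * w := by
  have s1 : stepN w = 2 * w := stepN_small w (by omega)
  have s2 : stepN (2 * w) = 4 * w := by rw [stepN_small _ (by norm_num at h ⊢; omega)]; ring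
  have s3 : stepN (4 * w) = 8 * w := by rw [stepN_small _ (by norm_num at h ⊢; omega)]; ring
  have s4 : stepN (8 * w) = 16 * w := by rw [stepN_small _ (by norm_num at h ⊢; omega)]; ring
  have s5 : stepN (16 * w) = 32 * w := by rw [stepN_small _ (by norm_num at h ⊢; omega)]; ring
  have s6 : stepN (32 * w) = 64 * w := by rw [stepN_small _ (by norm_num at h ⊢; omega)]; ring
  have s7 : stepN (64 * w) = 128 * w := by rw [stepN_small _ (by norm_num at h ⊢; omega)]; ring
  have s8 : stepN (128 * w) = 256 * w := by rw [stepN_small _ (by norm_num at h ⊢; omega)]; ring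
  show stepN^[8] w = 256 * w
  simp [Function.iterate_succ_apply, s1, s2, s3, s4, s5, s6, s7, s8]

-- split a 32-bit word into its top byte and low 24 bits (as an xor of disjoint parts)
theorem word_split (w : Nat) : w = ((w >>> 24) <<< 24) ^^^ (w &&& 0xffffff) := by
  have h : (0xffffff : Nat) = 2 ^ 24 - 1 := by norm_num
  rw [h]
  apply Nat.eq_of_testBit_eq
  intro i
  simp only [Nat.testBit_xor, Nat.testBit_shiftLeft, Nat.testBit_shiftRight, Nat.testBit_and,
    Nat.testBit_two_pow_sub_one]
  by_cases hi : 24 ≤ i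
  · simp [hi, Nat.add_sub_cancel' hi, Nat.not_lt.mpr hi]
  · simp [hi, Nat.lt_of_not_le hi]

theorem foldl_stepB_cast (n : Nat) (w : Nat) :
    (List.range n).foldl (fun v _ => stepB v) (w : Int) = ((stepN^[n] w : Nat) : Int) := by
  induction n generalizing w with
  | zero => simp
  | succ k ih =>
      rw [List.range_succ, List.foldl_append]
      simp only [List.foldl_cons, List.foldl_nil]
      rw [ih, stepB_cast, Function.iterate_succ_apply']

-- the byte-table chunk performs exactly eight steps
set_option maxRecDepth 4096 in
theorem chunk_eq (w : Nat) (hw : w < 4294967296) :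
    PySem.Int.bxor (PySem.Int.band (((w : Int)) <<< (8 : Nat)) 0xffffffff)
        (tableB.getD (((w : Int)) >>> (24 : Nat)).toNat 0)
      = ((stepN^[8] w : Nat) : Int) := by
  have hq : w >>> 24 < 256 := by
    rw [Nat.shiftRight_eq_div_pow]; omega
  have hidx : (((w : Int)) >>> (24 : Nat)).toNat = w >>> 24 := by
    rw [show ((w : Int) >>> (24 : Nat)) = ((w >>> 24 : Nat) : Int) from (Int.natCast_shiftRight w 24).symm,
      Int.toNat_natCast]
  have htab : tableB.getD (w >>> 24) 0 = ((stepN^[8] ((w >>> 24) <<< 24) : Nat) : Int) := by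
    rw [tableB, List.getD_eq_getElem _ _ (by simp only [List.length_map, List.length_range]; exact hq)]
    simp only [List.getElem_map, List.getElem_range]
    rw [step8B, show (((w >>> 24 : Nat) : Int)) <<< (24 : Nat)
        = ((((w >>> 24) <<< 24 : Nat)) : Int) from (Int.natCast_shiftLeft _ 24).symm]
    exact foldl_stepB_cast 8 _
  rw [hidx, htab,
    show ((w : Int) <<< (8 : Nat)) = ((w <<< 8 : Nat) : Int) from (Int.natCast_shiftLeft w 8).symm,
    PySem.Int.band_of_nonneg (by positivity) (by norm_num)]
  simp only [Int.toNat_natCast]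
  rw [show ((0xffffffff : Int).toNat) = 0xffffffff from rfl]
  rw [PySem.Int.bxor_of_nonneg (by positivity) (by positivity)]
  simp only [Int.toNat_natCast, Nat.cast_inj]
  -- now a pure Nat fact
  have hmask : (w <<< 8) &&& 0xffffffff = 256 * (w % 2 ^ 24) := by
    have h1 := Nat.and_two_pow_sub_one_eq_mod (w <<< 8) 32
    norm_num at h1 ⊢
    rw [h1, Nat.shiftLeft_eq]
    norm_num
    omega
  have hlow : stepN^[8] (w &&& 0xffffff) = 256 * (w % 2 ^ 24) := by
    have h2 : w &&& 0xffffff = w % 2 ^ 24 := by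
      have := Nat.and_two_pow_sub_one_eq_mod w 24; norm_num at this ⊢; omega
    rw [h2]
    exact stepN_iter8_small _ (Nat.mod_lt _ (by norm_num))
  conv_rhs => rw [word_split w, stepN_iter_xor, hlow]
  rw [hmask, Nat.xor_comm]

theorem band_mask_bounds (m : Int) :
    0 ≤ PySem.Int.band m 0xffffffff ∧ PySem.Int.band m 0xffffffff < 4294967296 := by
  rw [PySem.Int.band]
  split_ifs with h1 h2 h3 <;> push_cast <;> norm_num at *
  · have := Nat.and_le_right (n := m.toNat) (m := 4294967295)
    omega
  · have := Nat.sub_le 4294967295 ((4294967295 : Nat) &&& (-m - 1).toNat)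
    omega

theorem pmodAltLoop_cast (n : Int) (w : Nat) (hw : w < 4294967296) :
    pmodAltLoop (w : Int) n = ((stepN^[n.toNat] w : Nat) : Int) := by
  induction hk : n.toNat using Nat.strong_induction_on generalizing n w with
  | _ k ih =>
  rw [pmodAltLoop]
  split
  · rename_i h8
    rw [chunk_eq w hw]
    have hlt : stepN^[8] w < 4294967296 := by
      rw [show (8 : Nat) = 7 + 1 from rfl, Function.iterate_succ_apply']
      exact stepN_lt _
    rw [ih ((n - 8).toNat) (by omega) (n - 8) _ hlt rfl,
      ← Function.iterate_add_apply]
    congr 2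
    omega
  · split
    · rename_i h0
      rw [stepB_cast,
        ih ((n - 1).toNat) (by omega) (n - 1) _ (stepN_lt w) rfl,
        ← Function.iterate_succ_apply]
      congr 2
      omega
    · have : k = 0 := by omega
      simp [this]

-- ===== VERDICT (by name: the statement is the Claim_ definition above) =====
theorem pmod_spec : Claim_equal_pmod := by
  intro m lshift _
  unfold Spec_pmod pmod pmod_alt
  obtain ⟨h0, h1⟩ := band_mask_bounds m
  show List.foldl (fun v _ => stepB v) (PySem.Int.band m 0xffffffff) (List.range lshift.toNat)
      = pmodAltLoop (PySem.Int.band m 0xffffffff) lshift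
  rw [show PySem.Int.band m 0xffffffff
      = (((PySem.Int.band m 0xffffffff).toNat : Nat) : Int) by omega]
  rw [foldl_stepB_cast, pmodAltLoop_cast _ _ (by omega)]
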